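-- pv_equiv track=rewrite | github.com/sumeetbansaloo7/PythonSortingVisualisation | quickSort.py | colours
-- ===== SOURCE A (Python) =====
-- def colours(length, head, tail, border, curr, whenswapping=False):
--     cols = []
--     for i in range(length):
--         if i >= head and i <= tail:  # working half
--             cols.append('yellow')
--         else:  # half currently not working
--             cols.append('gray')
--         if i == tail:
--             cols[i] = 'brown'
--         elif i == border:
--             cols[i] = 'red'
--         elif i == curr:
--             cols[i] = "blue"
--         if whenswapping:
--             if i == border or i == curr:
--                 cols[i] = 'green'
--     return cols
-- ===== SOURCE B (Python) =====
-- def colours(length, head, tail, border, curr, whenswapping=False):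
--     n = length
--     # base coloring as three solid segments: gray [0,ys), yellow [ys,ye), gray [ye,n)
--     ys = min(max(head, 0), n)
--     ye = min(max(tail + 1, ys), n)
--     base = ['gray'] * ys + ['yellow'] * (ye - ys) + ['gray'] * (n - ye)
--
--     def special_color(p):
--         if whenswapping and (p == border or p == curr):
--             return 'green'
--         if p == tail:
--             return 'brown'
--         if p == border:
--             return 'red'
--         return 'blue'  # p == curr is the only remaining possibility
--
--     # splice the special cells into the base segments, left to right
--     out = []
--     prev = 0
--     for p in sorted({p for p in (tail, border, curr) if 0 <= p < n}):
--         out += base[prev:p]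
--         out.append(special_color(p))
--         prev = p + 1
--     out += base[prev:]
--     return out
-- ===== Notes on version B (the rewrite author's own statement) =====
-- stated objective: alternative
-- what changed: B renders the list as concatenated segments: the gray/yellow/gray base is built by list replication from clamped band boundaries, the in-range special positions among tail/border/curr go into a sorted set, and the output is spliced together from base slices with one special-colored cell per sorted position, removing all per-element branch tests.
import Mathlib
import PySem

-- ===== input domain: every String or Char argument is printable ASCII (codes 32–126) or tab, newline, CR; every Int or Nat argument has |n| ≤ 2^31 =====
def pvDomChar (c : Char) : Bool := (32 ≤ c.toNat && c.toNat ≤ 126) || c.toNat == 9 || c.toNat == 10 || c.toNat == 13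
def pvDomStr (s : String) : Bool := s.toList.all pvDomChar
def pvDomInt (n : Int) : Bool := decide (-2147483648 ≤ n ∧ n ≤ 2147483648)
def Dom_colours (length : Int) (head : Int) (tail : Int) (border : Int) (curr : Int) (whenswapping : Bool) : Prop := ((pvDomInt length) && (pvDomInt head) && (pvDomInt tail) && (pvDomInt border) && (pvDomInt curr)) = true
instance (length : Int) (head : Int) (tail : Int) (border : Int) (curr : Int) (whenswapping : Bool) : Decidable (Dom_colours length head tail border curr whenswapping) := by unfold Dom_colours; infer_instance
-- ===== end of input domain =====

-- B builds the gray/yellow/gray base by segment replication and splices the sorted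
-- in-range special positions (tail/border/curr) in as single cells; same O(n) cost,
-- a segment-rendering alternative to A's per-index loop.


-- ===== PORT A =====
-- cols[i] = x : the loop index i is nonnegative and i < len(cols), so Python's
-- in-range assignment is exactly List.set i.toNat.
-- the body of A's for-loop, one iteration
def stepA (head tail border curr : Int) (whenswapping : Bool) (cols : List String) (i : Int) : List String :=
  let cols := cols ++ [if i ≥ head ∧ i ≤ tail then "yellow" else "gray"]
  let cols :=
    if i = tail then cols.set i.toNat "brown"
    else if i = border then cols.set i.toNat "red"
    else if i = curr then cols.set i.toNat "blue"
    else cols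
  if whenswapping then
    (if i = border ∨ i = curr then cols.set i.toNat "green" else cols)
  else cols

def colours (length : Int) (head : Int) (tail : Int) (border : Int) (curr : Int) (whenswapping : Bool) : List String :=
  (PySem.List.pyRange 0 length 1).foldl (stepA head tail border curr whenswapping) []

-- ===== PORT B =====
-- B's special_color helper (called only on in-range members of {tail,border,curr})
def specColorB (tail border curr : Int) (whenswapping : Bool) (p : Int) : String :=
  if whenswapping = true ∧ (p = border ∨ p = curr) then "green"
  else if p = tail then "brown"
  else if p = border then "red"
  else "blue"  -- p == curr is the only remaining possibility

-- ['gray']*k is List.replicate k.toNat (negative multiplicities give [])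
def colours_alt (length : Int) (head : Int) (tail : Int) (border : Int) (curr : Int) (whenswapping : Bool) : List String :=
  let ys := min (max head 0) length
  let ye := min (max (tail + 1) ys) length
  let base := List.replicate ys.toNat "gray" ++ List.replicate (ye - ys).toNat "yellow"
      ++ List.replicate (length - ye).toNat "gray"
  let ps := PySem.List.sorted
      (PySem.Set.ofList (([tail, border, curr].filter (fun p => decide (0 ≤ p ∧ p < length)))))
      (fun x => x) false
  let r := ps.foldl
      (fun (s : List String × Int) p =>
        (s.1 ++ PySem.List.slice base (some s.2) (some p)
          ++ [specColorB tail border curr whenswapping p], p + 1))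
      (([] : List String), (0 : Int))
  r.1 ++ PySem.List.slice base (some r.2) none

-- ===== PRECONDITION & SPEC =====
def Spec_colours (length : Int) (head : Int) (tail : Int) (border : Int) (curr : Int) (whenswapping : Bool) (out : List String) : Prop := out = colours_alt length head tail border curr whenswapping
instance (length : Int) (head : Int) (tail : Int) (border : Int) (curr : Int) (whenswapping : Bool) (out : List String) : Decidable (Spec_colours length head tail border curr whenswapping out) := by unfold Spec_colours; infer_instance

-- ===== CLAIM (what is proved, stated in full; the proofs are below) =====
def Claim_equal_colours : Prop := ∀ (length : Int) (head : Int) (tail : Int) (border : Int) (curr : Int) (whenswapping : Bool), Dom_colours length head tail border curr whenswapping → Spec_colours length head tail border curr whenswapping (colours length head tail border curr whenswapping)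

-- ===== LEMMAS AND PROOFS =====

-- the color both programs give position i
def colorOf (head tail border curr : Int) (ws : Bool) (i : Int) : String :=
  let base := if head ≤ i ∧ i ≤ tail then "yellow" else "gray"
  let m := if i = tail then "brown" else if i = border then "red" else if i = curr then "blue" else base
  if ws ∧ (i = border ∨ i = curr) then "green" else m

theorem set_last {α : Type} (l : List α) (x y : α) : (l ++ [x]).set l.length y = l ++ [y] := by
  induction l with
  | nil => rfl
  | cons a t ih => simp [ih]

-- one iteration of A's loop appends exactly colorOf of the index
theorem stepA_eq (head tail border curr : Int) (ws : Bool) (a : Int) (cols : List String)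
    (hl : cols.length = a.toNat) :
    stepA head tail border curr ws cols a = cols ++ [colorOf head tail border curr ws a] := by
  have hset : ∀ (x y : String), (cols ++ [x]).set a.toNat y = cols ++ [y] := by
    intro x y; rw [← hl]; exact set_last cols x y
  unfold stepA colorOf
  cases ws <;> split_ifs <;> simp_all [hset]

theorem foldA_eq (head tail border curr L : Int) (ws : Bool) :
    ∀ (n : Nat) (a : Int) (cols : List String), (L - a).toNat = n → 0 ≤ a → cols.length = a.toNat →
    (PySem.List.pyRange a L 1).foldl (stepA head tail border curr ws) cols
    = cols ++ (PySem.List.pyRange a L 1).map (colorOf head tail border curr ws) := by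
  intro n
  induction n with
  | zero =>
    intro a cols hn ha hl
    rw [PySem.List.pyRange_one_eq_nil (by omega)]
    simp
  | succ n ih =>
    intro a cols hn ha hl
    rw [PySem.List.pyRange_one_cons (by omega), List.foldl_cons, List.map_cons]
    rw [stepA_eq head tail border curr ws a cols hl,
      ih (a + 1) (cols ++ [colorOf head tail border curr ws a]) (by omega) (by omega)
        (by simp [hl]; omega)]
    simp

theorem colours_eq_map (length head tail border curr : Int) (ws : Bool) :
    colours length head tail border curr ws
    = (PySem.List.pyRange 0 length 1).map (colorOf head tail border curr ws) := by
  have := foldA_eq head tail border curr length ws (length - 0).toNat 0 [] rfl le_rfl rfl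
  simpa [colours] using this

-- B-side: slices of a mapped range
theorem drop_map_range {α : Type} (f : Int → α) (n a : Int) (ha : 0 ≤ a) :
    ((PySem.List.pyRange 0 n 1).map f).drop a.toNat = (PySem.List.pyRange a n 1).map f := by
  by_cases h : a ≤ n
  · rw [PySem.List.pyRange_one_append 0 a n ha h, List.map_append]
    have hlen : ((PySem.List.pyRange 0 a 1).map f).length = a.toNat := by
      simp [PySem.List.length_pyRange_one]
    rw [← hlen, List.drop_left]
  · rw [show PySem.List.pyRange a n 1 = ([] : List Int) from
        PySem.List.pyRange_one_eq_nil (by omega), List.map_nil,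
      List.drop_eq_nil_of_le (by simp [PySem.List.length_pyRange_one]; omega)]

theorem slice_map_range {α : Type} (f : Int → α) (n a b : Int) (ha : 0 ≤ a) (hab : a ≤ b) (hbn : b ≤ n) :
    PySem.List.slice ((PySem.List.pyRange 0 n 1).map f) (some a) (some b)
    = (PySem.List.pyRange a b 1).map f := by
  rw [PySem.List.slice_toNat _ ha (by omega), drop_map_range f n a ha]
  rw [PySem.List.pyRange_one_append a b n hab hbn, List.map_append]
  have hlen : ((PySem.List.pyRange a b 1).map f).length = b.toNat - a.toNat := by
    simp [PySem.List.length_pyRange_one]; omega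
  rw [← hlen, List.take_left]

theorem slice_from_map_range {α : Type} (f : Int → α) (n a : Int) (ha : 0 ≤ a) :
    PySem.List.slice ((PySem.List.pyRange 0 n 1).map f) (some a) none
    = (PySem.List.pyRange a n 1).map f := by
  rw [PySem.List.slice_from _ ha, drop_map_range f n a ha]

-- the splice loop renders the range [prev, n): base cells except at the ks, spec there
theorem renderB (n : Int) (baseFn spec : Int → String) :
    ∀ (ks : List Int) (prev : Int) (acc : List String),
    ks.Pairwise (· < ·) → (∀ k ∈ ks, prev ≤ k ∧ k < n) → 0 ≤ prev →
    ((ks.foldl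
        (fun (s : List String × Int) p =>
          (s.1 ++ PySem.List.slice ((PySem.List.pyRange 0 n 1).map baseFn) (some s.2) (some p)
            ++ [spec p], p + 1)) (acc, prev)).1
      ++ PySem.List.slice ((PySem.List.pyRange 0 n 1).map baseFn)
          (some (ks.foldl
            (fun (s : List String × Int) p =>
              (s.1 ++ PySem.List.slice ((PySem.List.pyRange 0 n 1).map baseFn) (some s.2) (some p)
                ++ [spec p], p + 1)) (acc, prev)).2) none)
    = acc ++ (PySem.List.pyRange prev n 1).map (fun i => if i ∈ ks then spec i else baseFn i) := by
  intro ks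
  induction ks with
  | nil =>
    intro prev acc _ _ hp
    simp only [List.foldl_nil]
    rw [slice_from_map_range baseFn n prev hp]
    simp
  | cons k t ih =>
    intro prev acc hpw hb hp
    obtain ⟨hk1, hk2⟩ := hb k (List.mem_cons_self)
    have htgt : ∀ x ∈ t, k < x := (List.pairwise_cons.mp hpw).1
    simp only [List.foldl_cons]
    rw [ih (k + 1) _ (List.pairwise_cons.mp hpw).2
      (fun x hx => ⟨by have := htgt x hx; omega, (hb x (List.mem_cons_of_mem _ hx)).2⟩)
      (by omega)]
    rw [slice_map_range baseFn n prev k hp hk1 (le_of_lt hk2)]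
    rw [PySem.List.pyRange_one_append prev k n hk1 (le_of_lt hk2),
      PySem.List.pyRange_one_cons hk2, List.map_append, List.map_cons]
    have h1 : (PySem.List.pyRange prev k 1).map (fun i => if i ∈ k :: t then spec i else baseFn i)
        = (PySem.List.pyRange prev k 1).map baseFn := by
      apply List.map_congr_left
      intro i hi
      rw [PySem.List.mem_pyRange_one] at hi
      have : i ∉ k :: t := by
        simp only [List.mem_cons]
        push_neg
        exact ⟨by omega, fun hm => by have := htgt i hm; omega⟩
      simp [this]
    have h2 : (PySem.List.pyRange (k+1) n 1).map (fun i => if i ∈ k :: t then spec i else baseFn i)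
        = (PySem.List.pyRange (k+1) n 1).map (fun i => if i ∈ t then spec i else baseFn i) := by
      apply List.map_congr_left
      intro i hi
      rw [PySem.List.mem_pyRange_one] at hi
      have hne : i ≠ k := by omega
      simp [List.mem_cons, hne]
    rw [h1, h2]
    simp [List.mem_cons]

-- B's base list is the mapped base-color function
def baseFnB (head tail n : Int) (i : Int) : String :=
  if i < min (max head 0) n then "gray"
  else if i < min (max (tail + 1) (min (max head 0) n)) n then "yellow" else "gray"

theorem base_eq_map (n head tail : Int) :
    List.replicate (min (max head 0) n).toNat "gray"
      ++ List.replicate (min (max (tail + 1) (min (max head 0) n)) n - min (max head 0) n).toNat "yellow"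
      ++ List.replicate (n - min (max (tail + 1) (min (max head 0) n)) n).toNat "gray"
    = (PySem.List.pyRange 0 n 1).map (baseFnB head tail n) := by
  set ys := min (max head 0) n with hys
  set ye := min (max (tail + 1) ys) n with hye
  by_cases hn : 0 ≤ n
  · have h1 : 0 ≤ ys := by omega
    have h2 : ys ≤ ye := by omega
    have h3 : ye ≤ n := by omega
    have g1 : (PySem.List.pyRange 0 ys 1).map (baseFnB head tail n)
        = List.replicate ys.toNat "gray" := by
      rw [List.map_congr_left (g := fun _ => "gray") (fun i hi => by
        rw [PySem.List.mem_pyRange_one] at hi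
        simp only [baseFnB]; rw [if_pos (by omega)]), List.map_const']
      simp [PySem.List.length_pyRange_one]
    have g2 : (PySem.List.pyRange ys ye 1).map (baseFnB head tail n)
        = List.replicate (ye - ys).toNat "yellow" := by
      rw [List.map_congr_left (g := fun _ => "yellow") (fun i hi => by
        rw [PySem.List.mem_pyRange_one] at hi
        simp only [baseFnB]; rw [if_neg (by omega), if_pos (by omega)]), List.map_const']
      simp [PySem.List.length_pyRange_one]
    have g3 : (PySem.List.pyRange ye n 1).map (baseFnB head tail n)
        = List.replicate (n - ye).toNat "gray" := by
      rw [List.map_congr_left (g := fun _ => "gray") (fun i hi => by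
        rw [PySem.List.mem_pyRange_one] at hi
        simp only [baseFnB]; rw [if_neg (by omega), if_neg (by omega)]), List.map_const']
      simp [PySem.List.length_pyRange_one]
    rw [PySem.List.pyRange_one_append 0 ys n h1 (by omega),
      PySem.List.pyRange_one_append ys ye n h2 h3, List.map_append, List.map_append,
      g1, g2, g3, List.append_assoc]
  · have e1 : ys.toNat = 0 := by omega
    have e2 : (ye - ys).toNat = 0 := by omega
    have e3 : (n - ye).toNat = 0 := by omega
    rw [show PySem.List.pyRange 0 n 1 = ([] : List Int) from
      PySem.List.pyRange_one_eq_nil (by omega), e1, e2, e3]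
    simp

theorem spec_eq_color (head tail border curr i : Int) (ws : Bool)
    (hsp : i = tail ∨ i = border ∨ i = curr) :
    specColorB tail border curr ws i = colorOf head tail border curr ws i := by
  unfold specColorB colorOf
  cases ws <;> split_ifs <;> simp_all

theorem base_eq_color (head tail border curr i n : Int) (ws : Bool)
    (h0 : 0 ≤ i) (h1 : i < n) (ht : i ≠ tail) (hb : i ≠ border) (hc : i ≠ curr) :
    baseFnB head tail n i = colorOf head tail border curr ws i := by
  unfold baseFnB colorOf
  cases ws <;> split_ifs <;> simp_all <;> omega

theorem colours_alt_eq_map (n head tail border curr : Int) (ws : Bool) :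
    colours_alt n head tail border curr ws
    = (PySem.List.pyRange 0 n 1).map (colorOf head tail border curr ws) := by
  have hmem : ∀ i, i ∈ PySem.List.sorted
      (PySem.Set.ofList (([tail, border, curr].filter (fun p => decide (0 ≤ p ∧ p < n)))))
      (fun x => x) false ↔ ((i = tail ∨ i = border ∨ i = curr) ∧ 0 ≤ i ∧ i < n) := by
    intro i
    rw [PySem.List.mem_sorted, PySem.Set.mem_ofList, List.mem_filter]
    simp
  have hpw := PySem.List.sorted_ofList_pairwise_lt
    (([tail, border, curr].filter (fun p => decide (0 ≤ p ∧ p < n))))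
  simp only [colours_alt]
  rw [base_eq_map n head tail]
  rw [renderB n (baseFnB head tail n) (specColorB tail border curr ws) _ 0 [] hpw
    (fun k hk => ((hmem k).mp hk).2) le_rfl]
  rw [List.nil_append]
  apply List.map_congr_left
  intro i hi
  rw [PySem.List.mem_pyRange_one] at hi
  by_cases hin : i ∈ PySem.List.sorted
      (PySem.Set.ofList (([tail, border, curr].filter (fun p => decide (0 ≤ p ∧ p < n)))))
      (fun x => x) false
  · rw [if_pos hin]
    exact spec_eq_color head tail border curr i ws ((hmem i).mp hin).1
  · rw [if_neg hin]
    have hnsp : ¬(i = tail ∨ i = border ∨ i = curr) := fun h =>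
      hin ((hmem i).mpr ⟨h, hi.1, hi.2⟩)
    push_neg at hnsp
    exact base_eq_color head tail border curr i n ws hi.1 hi.2 hnsp.1 hnsp.2.1 hnsp.2.2

-- ===== VERDICT (by name: the statement is the Claim_ definition above) =====
theorem colours_spec : Claim_equal_colours := by
  intro length head tail border curr ws _
  unfold Spec_colours
  rw [colours_eq_map, colours_alt_eq_map]
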